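-- pv_equiv track=rewrite | github.com/LLNL/lbann | applications/FLASK/Transformer/datasets/pretokenize/GenerateVocab.py | join_vocabs
-- ===== SOURCE A (Python) =====
-- def join_vocabs(list_of_vocab_dicts):
--     """
--     Given a list of vocab dictionaries, join them together
--     such that all unique tokens are present in the final vocab dictionary
--     """
--     final_vocab = {}
--     counter = 0
--     for vocab in list_of_vocab_dicts:
--         for token in vocab.keys():
--             if token not in final_vocab.keys():
--                 final_vocab[token] = counter
--                 counter += 1
--     return final_vocab
-- ===== SOURCE B (Python) =====
-- def join_vocabs(list_of_vocab_dicts):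
--     """
--     Counter-free version: flatten all keys, keep each token's FIRST
--     occurrence, and compute its id by a closed-form formula: the number
--     of distinct tokens occurring strictly before that first occurrence.
--     """
--     tokens = [t for v in list_of_vocab_dicts for t in v]
--     return {t: len(set(tokens[:i]))
--             for i, t in enumerate(tokens)
--             if t not in tokens[:i]}
-- ===== Notes on version B (the rewrite author's own statement) =====
-- stated objective: alternative
-- what changed: Replaces A's single interleaved dict-membership-plus-running-counter loop with a counter-free formulation: flatten all keys, keep first occurrences selected by a prefix-membership test, and compute each token's id independently by the closed-form formula len(set(tokens[:i])) (number of distinct tokens before its first occurrence), trading A's linear pass for a quadratic but stateless per-token computation.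
import Mathlib
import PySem

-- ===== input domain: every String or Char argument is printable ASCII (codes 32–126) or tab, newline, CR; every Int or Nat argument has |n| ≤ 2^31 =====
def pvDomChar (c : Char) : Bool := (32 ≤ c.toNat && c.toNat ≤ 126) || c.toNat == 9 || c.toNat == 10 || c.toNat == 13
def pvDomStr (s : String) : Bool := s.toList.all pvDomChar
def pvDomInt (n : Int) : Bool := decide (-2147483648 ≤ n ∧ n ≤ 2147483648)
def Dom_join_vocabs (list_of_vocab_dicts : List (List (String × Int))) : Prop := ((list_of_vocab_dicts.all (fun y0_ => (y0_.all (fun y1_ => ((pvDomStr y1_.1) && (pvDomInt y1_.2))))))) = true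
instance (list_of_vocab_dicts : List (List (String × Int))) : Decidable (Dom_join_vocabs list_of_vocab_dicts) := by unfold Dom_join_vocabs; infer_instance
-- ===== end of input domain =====

-- B replaces A's interleaved membership-check-and-counter loop by a counter-free
-- quadratic formulation: each first-occurrence token gets the closed-form id
-- len(set(tokens[:i])); objective: alternative (stateless per-token ids, not faster).


-- ===== PORT A =====
-- final_vocab = {}; counter = 0; for vocab in …: for token in vocab.keys():
--   if token not in final_vocab.keys(): final_vocab[token] = counter; counter += 1
def join_vocabs (list_of_vocab_dicts : List (List (String × Int))) : List (String × Int) :=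
  (list_of_vocab_dicts.foldl
    (fun st vocab =>
      (vocab.map (fun p => p.1)).foldl
        (fun (st : PySem.Dict String Int × Int) token =>
          if st.1.contains token = false then (st.1.insert token st.2, st.2 + 1) else st)
        st)
    (PySem.Dict.empty, 0)).1.items

-- ===== PORT B =====
-- tokens = [t for v in … for t in v]
-- {t: len(set(tokens[:i])) for i, t in enumerate(tokens) if t not in tokens[:i]}
def join_vocabs_alt (list_of_vocab_dicts : List (List (String × Int))) : List (String × Int) :=
  let tokens : List String :=
    (list_of_vocab_dicts.map (fun vocab => vocab.map (fun p => p.1))).flatten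
  ((PySem.List.enumerate tokens 0).foldl
    (fun (d : PySem.Dict String Int) p =>
      if (PySem.List.slice tokens none (some p.1)).contains p.2 = false then
        d.insert p.2 (PySem.Set.len (PySem.Set.ofList (PySem.List.slice tokens none (some p.1))))
      else d)
    PySem.Dict.empty).items

-- ===== PRECONDITION & SPEC =====
def Spec_join_vocabs (list_of_vocab_dicts : List (List (String × Int))) (out : List (String × Int)) : Prop := out = join_vocabs_alt list_of_vocab_dicts
instance (list_of_vocab_dicts : List (List (String × Int))) (out : List (String × Int)) : Decidable (Spec_join_vocabs list_of_vocab_dicts out) := by unfold Spec_join_vocabs; infer_instance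

-- ===== CLAIM (what is proved, stated in full; the proofs are below) =====
def Claim_equal_join_vocabs : Prop := ∀ (list_of_vocab_dicts : List (List (String × Int))), Dom_join_vocabs list_of_vocab_dicts → Spec_join_vocabs list_of_vocab_dicts (join_vocabs list_of_vocab_dicts)

-- ===== LEMMAS AND PROOFS =====

-- the association list mapping the k-th token of u to id k
def pvNumbered (u : List String) : List (String × Int) :=
  (PySem.List.enumerate u 0).map (fun p => (p.2, p.1))

theorem pvNumbered_append_singleton (u : List String) (t : String) :
    pvNumbered (u ++ [t]) = pvNumbered u ++ [(t, (u.length : Int))] := by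
  simp [pvNumbered, PySem.List.enumerate_append, PySem.List.enumerate_cons,
        PySem.List.enumerate_nil]

theorem pvKeys_numbered (u : List String) :
    (pvNumbered u).map (fun p => p.1) = u := by
  show ((PySem.List.enumerate u 0).map (fun p => (p.2, p.1))).map (fun p => p.1) = u
  rw [List.map_map]
  exact PySem.List.map_snd_enumerate u 0

theorem pvContains_numbered (u : List String) (t : String) :
    (PySem.Dict.mk (pvNumbered u)).contains t = PySem.Set.contains u t := by
  calc (PySem.Dict.mk (pvNumbered u)).contains t
      = (pvNumbered u).any (fun p => p.1 == t) := rfl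
    _ = u.any (fun x => x == t) := by
        conv_rhs => rw [← pvKeys_numbered u]
        rw [List.any_map]
        rfl
    _ = u.contains t := List.any_beq'
    _ = PySem.Set.contains u t := rfl

theorem pvInsert_numbered (u : List String) (t : String)
    (h : PySem.Set.contains u t = false) :
    (PySem.Dict.mk (pvNumbered u)).insert t ((u.length : Int)) =
      PySem.Dict.mk (pvNumbered (u ++ [t])) := by
  have hc : (PySem.Dict.mk (pvNumbered u)).contains t = false := by
    rw [pvContains_numbered]; exact h
  simp [PySem.Dict.insert, hc, pvNumbered_append_singleton]

-- A-side loop invariant: the counter loop numbers the running ordered key-set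
theorem pvLoop (ts : List String) : ∀ (u : List String),
    ts.foldl
      (fun (st : PySem.Dict String Int × Int) token =>
        if st.1.contains token = false then (st.1.insert token st.2, st.2 + 1) else st)
      (PySem.Dict.mk (pvNumbered u), (u.length : Int)) =
    (PySem.Dict.mk (pvNumbered (ts.foldl PySem.Set.add u)),
      ((ts.foldl PySem.Set.add u).length : Int)) := by
  induction ts with
  | nil => intro u; rfl
  | cons t ts ih =>
      intro u
      by_cases h : PySem.Set.contains u t = true
      · have hc : (PySem.Dict.mk (pvNumbered u)).contains t = true := by
          rw [pvContains_numbered]; exact h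
        have hadd : PySem.Set.add u t = u := by unfold PySem.Set.add; rw [if_pos h]
        simpa [hadd, hc] using ih u
      · have hc : (PySem.Dict.mk (pvNumbered u)).contains t = false := by
          rw [pvContains_numbered]; simpa using h
        have hadd : PySem.Set.add u t = u ++ [t] := by unfold PySem.Set.add; rw [if_neg h]
        have hins := pvInsert_numbered u t (by simpa using h)
        simpa [hadd, hc, hins] using ih (u ++ [t])

theorem pvOfList_append_singleton (pre : List String) (t : String) :
    PySem.Set.ofList (pre ++ [t]) = PySem.Set.add (PySem.Set.ofList pre) t := by
  simp [PySem.Set.ofList_eq_foldl, List.foldl_append]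

-- B-side loop invariant: folding the first-occurrence/prefix-count step over the
-- enumeration of the suffix ts (tokens = pre ++ ts) numbers the ordered key-set
theorem pvLoopB (tokens : List String) (ts : List String) : ∀ (pre : List String),
    tokens = pre ++ ts →
    (PySem.List.enumerate ts ((pre.length : Nat) : Int)).foldl
      (fun (d : PySem.Dict String Int) p =>
        if (PySem.List.slice tokens none (some p.1)).contains p.2 = false then
          d.insert p.2 (PySem.Set.len (PySem.Set.ofList (PySem.List.slice tokens none (some p.1))))
        else d)
      (PySem.Dict.mk (pvNumbered (PySem.Set.ofList pre))) =
    PySem.Dict.mk (pvNumbered (ts.foldl PySem.Set.add (PySem.Set.ofList pre))) := by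
  induction ts with
  | nil => intro pre _; rfl
  | cons t ts ih =>
      intro pre htok
      rw [PySem.List.enumerate_cons, List.foldl_cons]
      have hslice : PySem.List.slice tokens none (some ((pre.length : Nat) : Int)) = pre := by
        rw [PySem.List.slice_to_natCast, htok, List.take_left]
      have hstep : ∀ d, (if (PySem.List.slice tokens none (some ((pre.length : Nat) : Int))).contains t = false then
            PySem.Dict.insert d t (PySem.Set.len (PySem.Set.ofList (PySem.List.slice tokens none (some ((pre.length : Nat) : Int)))))
          else d) =
          (if PySem.Set.contains pre t = false then
            PySem.Dict.insert d t (PySem.Set.len (PySem.Set.ofList pre)) else d) := by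
        intro d; rw [hslice]; rfl
      have hnext : tokens = (pre ++ [t]) ++ ts := by rw [htok]; simp
      have hlen : ((pre.length : Nat) : Int) + 1 = (((pre ++ [t]).length : Nat) : Int) := by
        simp
      have hmemeq : PySem.Set.contains (PySem.Set.ofList pre) t = PySem.Set.contains pre t := by
        simp
      by_cases h : PySem.Set.contains pre t = true
      · have hadd : PySem.Set.add (PySem.Set.ofList pre) t = PySem.Set.ofList pre := by
          unfold PySem.Set.add; rw [if_pos (hmemeq.trans h)]
        have hpre : PySem.Set.ofList (pre ++ [t]) = PySem.Set.ofList pre := by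
          rw [pvOfList_append_singleton, hadd]
        have hrec := ih (pre ++ [t]) hnext
        rw [hstep, if_neg (fun hx => by rw [h] at hx; cases hx), hlen]
        rw [hpre] at hrec
        rw [hrec, List.foldl_cons, hadd]
      · have h' : PySem.Set.contains pre t = false := by simpa using h
        have hmem : PySem.Set.contains (PySem.Set.ofList pre) t = false := hmemeq.trans h'
        have hadd : PySem.Set.add (PySem.Set.ofList pre) t = PySem.Set.ofList pre ++ [t] := by
          unfold PySem.Set.add; rw [if_neg (fun hx => by rw [hmem] at hx; cases hx)]
        have hval : PySem.Set.len (PySem.Set.ofList pre) = (((PySem.Set.ofList pre).length : Nat) : Int) := rfl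
        rw [hstep, if_pos h', hval, pvInsert_numbered _ _ hmem, hlen]
        have hrec := ih (pre ++ [t]) hnext
        rw [pvOfList_append_singleton, hadd] at hrec
        rw [hrec, List.foldl_cons, hadd]

theorem pvLoopB0 (tokens : List String) :
    (PySem.List.enumerate tokens 0).foldl
      (fun (d : PySem.Dict String Int) p =>
        if (PySem.List.slice tokens none (some p.1)).contains p.2 = false then
          d.insert p.2 (PySem.Set.len (PySem.Set.ofList (PySem.List.slice tokens none (some p.1))))
        else d)
      PySem.Dict.empty =
    PySem.Dict.mk (pvNumbered (tokens.foldl PySem.Set.add [])) := by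
  exact pvLoopB tokens tokens [] rfl

-- ===== VERDICT (by name: the statement is the Claim_ definition above) =====
theorem join_vocabs_spec : Claim_equal_join_vocabs := by
  intro l _
  show join_vocabs l = join_vocabs_alt l
  have lhs : join_vocabs l =
      (((l.map (fun vocab => vocab.map (fun p => p.1))).flatten).foldl
        (fun (st : PySem.Dict String Int × Int) token =>
          if st.1.contains token = false then (st.1.insert token st.2, st.2 + 1) else st)
        (PySem.Dict.mk (pvNumbered []), ((List.length ([] : List String) : Nat) : Int))).1.items := by
    unfold join_vocabs
    rw [List.foldl_flatten, List.foldl_map]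
    rfl
  rw [lhs, pvLoop]
  simp only [join_vocabs_alt]
  rw [pvLoopB0]
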